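-- pv_equiv track=rewrite | github.com/officialn8/prediction-market-movers | apps/dashboard/pages/6_Live_View.py | balance_rows_by_source
-- ===== SOURCE A (Python) =====
-- def balance_rows_by_source(rows: list[dict], limit: int) -> list[dict]:
--     """Keep Live View readable by preventing one source from crowding out others."""
--     if limit <= 0 or not rows:
--         return []
--
--     source_order: list[str] = []
--     for row in rows:
--         source = str(row.get("source") or "unknown").lower()
--         if source not in source_order:
--             source_order.append(source)
--
--     if not source_order:
--         return rows[:limit]
--
--     per_source_cap = max(1, limit // len(source_order))
--     counts = {source: 0 for source in source_order}
--     selected: list[dict] = []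
--     selected_indexes: set[int] = set()
--
--     for idx, row in enumerate(rows):
--         source = str(row.get("source") or "unknown").lower()
--         if counts.get(source, 0) >= per_source_cap:
--             continue
--         selected.append(row)
--         selected_indexes.add(idx)
--         counts[source] = counts.get(source, 0) + 1
--         if len(selected) >= limit:
--             return selected
--
--     if len(selected) < limit:
--         for idx, row in enumerate(rows):
--             if idx in selected_indexes:
--                 continue
--             selected.append(row)
--             if len(selected) >= limit:
--                 break
--
--     return selected[:limit]
-- ===== SOURCE B (Python) =====
-- def balance_rows_by_source(rows: list[dict], limit: int) -> list[dict]: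
--     """Keep Live View readable by preventing one source from crowding out others."""
--     if limit <= 0 or not rows:
--         return []
--
--     def src(row):
--         return str(row.get("source") or "unknown").lower()
--
--     per_source_cap = max(1, limit // len({src(row) for row in rows}))
--     counts: dict[str, int] = {}
--     accepted: list[dict] = []
--     overflow: list[dict] = []
--     for row in rows:
--         source = src(row)
--         if counts.get(source, 0) >= per_source_cap:
--             overflow.append(row)
--         else:
--             accepted.append(row)
--             counts[source] = counts.get(source, 0) + 1
--
--     return (accepted + overflow)[:limit]
-- ===== Notes on version B (the rewrite author's own statement) =====
-- stated objective: simpler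
-- what changed: Replaced A's cap-then-rescan design (selection loop with early return plus a selected-index set driving a second full scan over enumerate(rows)) by a single partition pass into accepted/overflow lists followed by one truncation of accepted + overflow; the index set, the second scan and the pre-zeroed counts dict disappear.
import Mathlib
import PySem

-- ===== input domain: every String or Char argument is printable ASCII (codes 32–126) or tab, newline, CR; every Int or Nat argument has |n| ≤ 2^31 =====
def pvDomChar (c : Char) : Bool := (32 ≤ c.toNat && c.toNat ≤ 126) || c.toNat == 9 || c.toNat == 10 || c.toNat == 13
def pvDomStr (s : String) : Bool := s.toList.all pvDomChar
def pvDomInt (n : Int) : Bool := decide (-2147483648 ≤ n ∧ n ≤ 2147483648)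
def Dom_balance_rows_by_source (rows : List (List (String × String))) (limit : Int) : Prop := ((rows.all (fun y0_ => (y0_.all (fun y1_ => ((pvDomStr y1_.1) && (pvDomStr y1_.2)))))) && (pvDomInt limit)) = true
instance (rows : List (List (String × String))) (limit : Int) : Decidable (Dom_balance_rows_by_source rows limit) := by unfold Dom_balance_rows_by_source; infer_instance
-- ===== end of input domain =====

-- B replaces A's cap-then-rescan-with-index-set by a single partition pass (accepted/overflow) and one final
-- truncation of accepted ++ overflow; objective: simpler (same asymptotic cost).

-- ===== PORT A =====
-- shared by both ports: source = str(row.get("source") or "unknown").lower()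
def srcOf (row : List (String × String)) : String :=
  PySem.Str.lower (match (PySem.Dict.mk row).get? "source" with
    | some v => if v = "" then "unknown" else v
    | none => "unknown")

-- A's first loop: build source_order (append each source not yet present)
def aOrderLoop : List (List (String × String)) → List String → List String
  | [], acc => acc
  | r :: rs, acc => aOrderLoop rs (if (srcOf r) ∈ acc then acc else acc ++ [srcOf r])

-- A's selection loop (with the early `return selected` once the limit is hit)
def aLoop1 : List (List (String × String)) → Int → Int → PySem.Dict String Int →
    List (List (String × String)) → PySem.Set Int → Int →
    (List (List (String × String))) ⊕ (List (List (String × String)) × PySem.Set Int)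
  | [], _, _, _, sel, sidx, _ => .inr (sel, sidx)
  | r :: rs, cap, limit, counts, sel, sidx, idx =>
    let s := srcOf r
    if counts.getD s 0 ≥ cap then
      aLoop1 rs cap limit counts sel sidx (idx + 1)
    else
      let sel' := sel ++ [r]
      let sidx' := PySem.Set.add sidx idx
      let counts' := counts.insert s (counts.getD s 0 + 1)
      if (sel'.length : Int) ≥ limit then .inl sel'
      else aLoop1 rs cap limit counts' sel' sidx' (idx + 1)

-- A's second loop (fill from not-yet-selected rows, break at limit)
def aLoop2 : List (List (String × String)) → Int → PySem.Set Int →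
    List (List (String × String)) → Int → List (List (String × String))
  | [], _, _, sel, _ => sel
  | r :: rs, idx, sidx, sel, limit =>
    if sidx.contains idx then aLoop2 rs (idx + 1) sidx sel limit
    else
      let sel' := sel ++ [r]
      if (sel'.length : Int) ≥ limit then sel'
      else aLoop2 rs (idx + 1) sidx sel' limit

def balance_rows_by_source (rows : List (List (String × String))) (limit : Int) : List (List (String × String)) :=
  if limit ≤ 0 ∨ rows = [] then []
  else
    let source_order := aOrderLoop rows []
    if source_order = [] then PySem.List.slice rows none (some limit)
    else
      let per_source_cap := max 1 (PySem.Int.floordiv limit (source_order.length : Int))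
      let counts0 := source_order.foldl (fun d s => d.insert s 0) PySem.Dict.empty
      match aLoop1 rows per_source_cap limit counts0 [] PySem.Set.empty 0 with
      | .inl sel => sel
      | .inr (sel, sidx) =>
        let sel2 := if (sel.length : Int) < limit then aLoop2 rows 0 sidx sel limit else sel
        PySem.List.slice sel2 none (some limit)

-- ===== PORT B =====
-- B's single partition pass: rows whose source is at its cap go to overflow, the rest to accepted
def bLoop : List (List (String × String)) → Int → PySem.Dict String Int →
    List (List (String × String)) → List (List (String × String)) →
    List (List (String × String)) × List (List (String × String))
  | [], _, _, acc, ovf => (acc, ovf)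
  | r :: rs, cap, counts, acc, ovf =>
    let s := srcOf r
    if counts.getD s 0 ≥ cap then bLoop rs cap counts acc (ovf ++ [r])
    else bLoop rs cap (counts.insert s (counts.getD s 0 + 1)) (acc ++ [r]) ovf

def balance_rows_by_source_alt (rows : List (List (String × String))) (limit : Int) : List (List (String × String)) :=
  if limit ≤ 0 ∨ rows = [] then []
  else
    let per_source_cap := max 1 (PySem.Int.floordiv limit ((PySem.Set.ofList (rows.map srcOf)).length : Int))
    let p := bLoop rows per_source_cap PySem.Dict.empty [] []
    PySem.List.slice (p.1 ++ p.2) none (some limit)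

-- ===== PRECONDITION & SPEC =====
def Spec_balance_rows_by_source (rows : List (List (String × String))) (limit : Int) (out : List (List (String × String))) : Prop := out = balance_rows_by_source_alt rows limit
instance (rows : List (List (String × String))) (limit : Int) (out : List (List (String × String))) : Decidable (Spec_balance_rows_by_source rows limit out) := by unfold Spec_balance_rows_by_source; infer_instance

-- ===== CLAIM (what is proved, stated in full; the proofs are below) =====
def Claim_equal_balance_rows_by_source : Prop := ∀ (rows : List (List (String × String))) (limit : Int), Dom_balance_rows_by_source rows limit → Spec_balance_rows_by_source rows limit (balance_rows_by_source rows limit)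

-- ===== LEMMAS AND PROOFS =====

lemma setContains_add (s : PySem.Set Int) (x j : Int) :
    (PySem.Set.add s x).contains j = (s.contains j || j == x) := by
  simp [PySem.Set.add, PySem.Set.contains, beq_eq_decide]
  split <;> rename_i h <;> simp_all

-- rows that A's second loop walks over: the rows of `rs` (indexed from `idx`) whose index is not in `S`
def enumFilter : List (List (String × String)) → Int → PySem.Set Int → List (List (String × String))
  | [], _, _ => []
  | r :: rs, idx, S =>
    if S.contains idx then enumFilter rs (idx + 1) S else r :: enumFilter rs (idx + 1) S

lemma aOrderLoop_eq_foldl (rows : List (List (String × String))) (acc : List String) :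
    aOrderLoop rows acc = (rows.map srcOf).foldl PySem.Set.add acc := by
  induction rows generalizing acc with
  | nil => rfl
  | cons r rs ih =>
    simp only [aOrderLoop, List.map, List.foldl, ih]
    congr 1
    simp [PySem.Set.add, PySem.Set.contains]

lemma bLoop_append (rs : List (List (String × String))) (cap : Int) (c : PySem.Dict String Int)
    (acc ovf : List (List (String × String))) :
    bLoop rs cap c acc ovf = (acc ++ (bLoop rs cap c [] []).1, ovf ++ (bLoop rs cap c [] []).2) := by
  induction rs generalizing c acc ovf with
  | nil => simp [bLoop]
  | cons r rs ih =>
    simp only [bLoop]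
    split
    · rw [ih c acc (ovf ++ [r]), ih c [] ([] ++ [r])]
      simp
    · rw [ih _ (acc ++ [r]) ovf, ih _ ([] ++ [r]) []]
      simp

lemma main_invariant (rs : List (List (String × String))) (cap limit : Int)
    (c₁ c₂ : PySem.Dict String Int) (sel : List (List (String × String)))
    (sidx : PySem.Set Int) (idx : Int)
    (hc : ∀ s, c₁.getD s 0 = c₂.getD s 0)
    (hsel : (sel.length : Int) < limit)
    (hsidx : ∀ j, sidx.contains j = true → j < idx) :
    (if limit ≤ (sel.length : Int) + ((bLoop rs cap c₂ [] []).1.length : Int) then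
       aLoop1 rs cap limit c₁ sel sidx idx =
         .inl (sel ++ (bLoop rs cap c₂ [] []).1.take (limit - sel.length).toNat)
     else ∃ S, aLoop1 rs cap limit c₁ sel sidx idx = .inr (sel ++ (bLoop rs cap c₂ [] []).1, S) ∧
       enumFilter rs idx S = (bLoop rs cap c₂ [] []).2 ∧
       (∀ j, j < idx → S.contains j = sidx.contains j)) := by
  induction rs generalizing c₁ c₂ sel sidx idx with
  | nil =>
    rw [if_neg (by simp [bLoop]; omega)]
    exact ⟨sidx, by simp [aLoop1, bLoop], by simp [enumFilter, bLoop], fun j _ => rfl⟩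
  | cons r rs ih =>
    have hcs := hc (srcOf r)
    by_cases hcap : c₂.getD (srcOf r) 0 ≥ cap
    · -- row rejected by the cap in both loops
      have hb : bLoop (r :: rs) cap c₂ [] [] =
          ((bLoop rs cap c₂ [] []).1, [r] ++ (bLoop rs cap c₂ [] []).2) := by
        simp only [bLoop, if_pos hcap]
        rw [bLoop_append rs cap c₂ [] ([] ++ [r])]
        simp
      have ha : aLoop1 (r :: rs) cap limit c₁ sel sidx idx =
          aLoop1 rs cap limit c₁ sel sidx (idx + 1) := by
        simp only [aLoop1]
        rw [if_pos (by rw [hcs]; exact hcap)]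
      have hrec := ih c₁ c₂ sel sidx (idx + 1) hc hsel (fun j hj => by have := hsidx j hj; omega)
      rw [hb, ha]
      by_cases hbig : limit ≤ (sel.length : Int) + ((bLoop rs cap c₂ [] []).1.length : Int)
      · rw [if_pos hbig]; rw [if_pos hbig] at hrec; exact hrec
      · rw [if_neg hbig]; rw [if_neg hbig] at hrec
        obtain ⟨S, h1, h2, h3⟩ := hrec
        refine ⟨S, h1, ?_, fun j hj => h3 j (by omega)⟩
        have hSidx : S.contains idx = false := by
          rw [h3 idx (by omega)]
          cases h : sidx.contains idx
          · rfl
          · exact absurd (hsidx idx h) (by omega)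
        simp only [enumFilter, hSidx, Bool.false_eq_true, if_false]
        rw [h2]
        rfl
    · -- row accepted in both loops
      have hb : bLoop (r :: rs) cap c₂ [] [] =
          ([r] ++ (bLoop rs cap (c₂.insert (srcOf r) (c₂.getD (srcOf r) 0 + 1)) [] []).1,
           (bLoop rs cap (c₂.insert (srcOf r) (c₂.getD (srcOf r) 0 + 1)) [] []).2) := by
        simp only [bLoop, if_neg hcap]
        rw [bLoop_append _ cap _ ([] ++ [r]) []]
        simp
      rw [hb]
      set c₂' := c₂.insert (srcOf r) (c₂.getD (srcOf r) 0 + 1) with hc2'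
      set P' := (bLoop rs cap c₂' [] []).1 with hP'
      by_cases hstop : ((sel ++ [r]).length : Int) ≥ limit
      · -- the early `return selected`
        have ha : aLoop1 (r :: rs) cap limit c₁ sel sidx idx = .inl (sel ++ [r]) := by
          simp only [aLoop1]
          rw [if_neg (by rw [hcs]; exact hcap), if_pos hstop]
        have hbig : limit ≤ (sel.length : Int) + (([r] ++ P').length : Int) := by
          simp at hstop ⊢; omega
        rw [if_pos hbig, ha]
        have h1 : (limit - (sel.length : Int)).toNat = 1 := by simp at hstop; omega
        rw [h1]
        simp
      · have ha : aLoop1 (r :: rs) cap limit c₁ sel sidx idx =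
            aLoop1 rs cap limit (c₁.insert (srcOf r) (c₁.getD (srcOf r) 0 + 1)) (sel ++ [r])
              (PySem.Set.add sidx idx) (idx + 1) := by
          simp only [aLoop1]
          rw [if_neg (by rw [hcs]; exact hcap), if_neg hstop]
        have hc' : ∀ t, (c₁.insert (srcOf r) (c₁.getD (srcOf r) 0 + 1)).getD t 0 = c₂'.getD t 0 := by
          intro t
          rw [hc2']
          simp [PySem.Dict.getD_insert, hc t, hcs]
        have hsel' : (((sel ++ [r]).length : Int)) < limit := by simp at hstop ⊢; omega
        have hsidx' : ∀ j, (PySem.Set.add sidx idx).contains j = true → j < idx + 1 := by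
          intro j hj
          simp only [setContains_add, Bool.or_eq_true, beq_iff_eq] at hj
          rcases hj with h | h
          · have := hsidx j h; omega
          · omega
        have hrec := ih _ c₂' (sel ++ [r]) (PySem.Set.add sidx idx) (idx + 1) hc' hsel' hsidx'
        by_cases hbig : limit ≤ (sel.length : Int) + (([r] ++ P').length : Int)
        · rw [if_pos hbig, ha]
          have hbig' : limit ≤ (((sel ++ [r]).length : Int)) + (P'.length : Int) := by
            simp at hbig ⊢; omega
          rw [if_pos hbig'] at hrec
          rw [hrec]
          have h1 : (limit - (sel.length : Int)).toNat = (limit - (((sel ++ [r]).length : Int))).toNat + 1 := by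
            simp at hstop ⊢; omega
          rw [h1]
          simp [List.take_succ_cons]
          rfl
        · rw [if_neg hbig, ha]
          have hbig' : ¬ limit ≤ (((sel ++ [r]).length : Int)) + (P'.length : Int) := by
            simp at hbig ⊢; omega
          rw [if_neg hbig'] at hrec
          obtain ⟨S, h1, h2, h3⟩ := hrec
          refine ⟨S, by rw [h1]; simp; rfl, ?_, ?_⟩
          · have hSidx : S.contains idx = true := by
              rw [h3 idx (by omega), setContains_add]
              simp
            simp only [enumFilter, hSidx, if_true]
            exact h2
          · intro j hj
            rw [h3 j (by omega), setContains_add]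
            have hne : (j == idx) = false := by simp; omega
            rw [hne, Bool.or_false]

lemma aLoop2_eq (rs : List (List (String × String))) (idx : Int) (S : PySem.Set Int)
    (sel : List (List (String × String))) (limit : Int)
    (hsel : (sel.length : Int) < limit) :
    aLoop2 rs idx S sel limit = sel ++ (enumFilter rs idx S).take (limit - sel.length).toNat := by
  induction rs generalizing idx sel with
  | nil => simp [aLoop2, enumFilter]
  | cons r rs ih =>
    simp only [aLoop2, enumFilter]
    by_cases hmem : S.contains idx
    · simp only [hmem, if_true]
      exact ih (idx + 1) sel hsel
    · simp only [hmem, if_false, Bool.false_eq_true]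
      by_cases hlim : ((sel ++ [r]).length : Int) ≥ limit
      · simp only [hlim, if_true]
        have h1 : (limit - (sel.length : Int)).toNat = 1 := by
          simp at hlim; omega
        rw [h1, List.take_succ_cons, List.take_zero]
      · simp only [hlim, if_false]
        have hsel' : (((sel ++ [r]).length : Int)) < limit := by
          simp at hlim ⊢; omega
        rw [ih (idx + 1) (sel ++ [r]) hsel']
        have h1 : (limit - (sel.length : Int)).toNat = (limit - ((sel ++ [r]).length : Int)).toNat + 1 := by
          simp at hsel' ⊢; omega
        rw [h1, List.take_succ_cons]
        simp

lemma getD_foldl_insert_zero (l : List String) (d : PySem.Dict String Int)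
    (h : ∀ s, d.getD s 0 = 0) : ∀ s, (l.foldl (fun d s => d.insert s 0) d).getD s 0 = 0 := by
  induction l generalizing d with
  | nil => exact h
  | cons x xs ih =>
    intro s
    refine ih (d.insert x 0) (fun t => ?_) s
    rw [PySem.Dict.getD_insert]
    split <;> simp [h]

-- ===== VERDICT (by name: the statement is the Claim_ definition above) =====
theorem balance_rows_by_source_spec : Claim_equal_balance_rows_by_source := by
  intro rows limit _dom
  unfold Spec_balance_rows_by_source
  by_cases hg : limit ≤ 0 ∨ rows = []
  · simp only [balance_rows_by_source, balance_rows_by_source_alt, if_pos hg]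
  · push_neg at hg
    obtain ⟨hlim, hrows⟩ := hg
    have hlim' : 0 < limit := by omega
    have hord : aOrderLoop rows [] = PySem.Set.ofList (rows.map srcOf) := by
      rw [aOrderLoop_eq_foldl]
      exact (PySem.Set.ofList_eq_foldl _).symm
    have hne : aOrderLoop rows [] ≠ [] := by
      rw [hord]
      obtain ⟨r, rs, rfl⟩ := List.exists_cons_of_ne_nil hrows
      intro h
      have hmem : srcOf r ∈ PySem.Set.ofList ((r :: rs).map srcOf) := by
        rw [PySem.Set.mem_ofList]; simp
      rw [h] at hmem
      simp at hmem
    set cap := max 1 (PySem.Int.floordiv limit (((aOrderLoop rows []).length : Int))) with hcap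
    have hcapB : max 1 (PySem.Int.floordiv limit (((PySem.Set.ofList (rows.map srcOf)).length : Int))) = cap := by
      rw [hcap, hord]
    set counts0 := (aOrderLoop rows []).foldl (fun d s => d.insert s 0) (PySem.Dict.empty : PySem.Dict String Int) with hc0
    have hc : ∀ s, counts0.getD s 0 = (PySem.Dict.empty : PySem.Dict String Int).getD s 0 := by
      intro s
      rw [hc0, getD_foldl_insert_zero _ _ (fun t => by simp)]
      simp
    set P := (bLoop rows cap PySem.Dict.empty [] []).1 with hP
    set Q := (bLoop rows cap PySem.Dict.empty [] []).2 with hQ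
    have hinv := main_invariant rows cap limit counts0 PySem.Dict.empty [] PySem.Set.empty 0 hc
      (by simpa using hlim') (fun j hj => by simp [PySem.Set.empty, PySem.Set.contains] at hj)
    have hB : balance_rows_by_source_alt rows limit = (P ++ Q).take limit.toNat := by
      simp only [balance_rows_by_source_alt]
      rw [if_neg (by push_neg; exact ⟨hlim, hrows⟩)]
      rw [hcapB, PySem.List.slice_to _ (by omega)]
    by_cases hbig : limit ≤ ((0 : Nat) : Int) + (P.length : Int)
    · rw [if_pos (by simpa using hbig)] at hinv
      have hA : balance_rows_by_source rows limit = P.take limit.toNat := by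
        simp only [balance_rows_by_source]
        rw [if_neg (by push_neg; exact ⟨hlim, hrows⟩), if_neg hne, hinv]
        simp
        rfl
      rw [hA, hB, List.take_append_of_le_length (by omega)]
    · rw [if_neg (by simpa using hbig)] at hinv
      obtain ⟨S, h1, h2, h3⟩ := hinv
      have hPlt : (P.length : Int) < limit := by simp at hbig; omega
      have hA : balance_rows_by_source rows limit =
          (P ++ Q.take (limit - (P.length : Int)).toNat).take limit.toNat := by
        simp only [balance_rows_by_source]
        rw [if_neg (by push_neg; exact ⟨hlim, hrows⟩), if_neg hne, h1]
        simp only [List.nil_append]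
        rw [if_pos hPlt, aLoop2_eq rows 0 S P limit hPlt, h2]
        rw [PySem.List.slice_to _ (by omega)]
      rw [hA, hB, List.take_append, List.take_append, List.take_take]
      have hmin : min (limit.toNat - P.length) (limit - (P.length : Int)).toNat = limit.toNat - P.length := by omega
      rw [hmin]
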